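-- pv_equiv track=rewrite | github.com/LottieWang/mindspore | model_zoo/research/nlp/senta/src/convert.py | build_params_map
-- ===== SOURCE A (Python) =====
-- import collections
--
-- def build_params_map(attention_num=24):
--     """
--     build params map from paddle-paddle's ERNIE to transformer's BERT
--     :return:
--     """
--     weight_map = collections.OrderedDict({
--         'word_embedding': "bert.bert.bert_embedding_lookup.embedding_table",
--         'pos_embedding': "bert.bert.bert_embedding_postprocessor.full_position_embeddings",
--         'sent_embedding': "bert.bert.bert_embedding_postprocessor.embedding_table",
--         'pre_encoder_layer_norm_scale': 'bert.bert.bert_embedding_postprocessor.layernorm.gamma',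
--         'pre_encoder_layer_norm_bias': 'bert.bert.bert_embedding_postprocessor.layernorm.beta',
--     })
--     # add attention layers
--     for i in range(attention_num):
--         weight_map[
--             f'encoder_layer_{i}_multi_head_att_query_fc.w_0'] =\
--             f'bert.bert.bert_encoder.layers.{i}.attention.attention.query_layer.weight'
--         weight_map[
--             f'encoder_layer_{i}_multi_head_att_query_fc.b_0'] =\
--             f'bert.bert.bert_encoder.layers.{i}.attention.attention.query_layer.bias'
--         weight_map[
--             f'encoder_layer_{i}_multi_head_att_key_fc.w_0'] = \
--             f'bert.bert.bert_encoder.layers.{i}.attention.attention.key_layer.weight'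
--         weight_map[
--             f'encoder_layer_{i}_multi_head_att_key_fc.b_0'] =\
--             f'bert.bert.bert_encoder.layers.{i}.attention.attention.key_layer.bias'
--         weight_map[
--             f'encoder_layer_{i}_multi_head_att_value_fc.w_0'] =\
--             f'bert.bert.bert_encoder.layers.{i}.attention.attention.value_layer.weight'
--         weight_map[
--             f'encoder_layer_{i}_multi_head_att_value_fc.b_0'] =\
--             f'bert.bert.bert_encoder.layers.{i}.attention.attention.value_layer.bias'
--         weight_map[
--             f'encoder_layer_{i}_multi_head_att_output_fc.w_0'] =\
--             f'bert.bert.bert_encoder.layers.{i}.attention.output.dense.weight'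
--         weight_map[
--             f'encoder_layer_{i}_multi_head_att_output_fc.b_0'] =\
--             f'bert.bert.bert_encoder.layers.{i}.attention.output.dense.bias'
--         weight_map[
--             f'encoder_layer_{i}_post_att_layer_norm_scale'] =\
--             f'bert.bert.bert_encoder.layers.{i}.attention.output.layernorm.gamma'
--         weight_map[
--             f'encoder_layer_{i}_post_att_layer_norm_bias'] =\
--             f'bert.bert.bert_encoder.layers.{i}.attention.output.layernorm.beta'
--         weight_map[f'encoder_layer_{i}_ffn_fc_0.w_0'] = f'bert.bert.bert_encoder.layers.{i}.intermediate.weight'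
--         weight_map[f'encoder_layer_{i}_ffn_fc_0.b_0'] = f'bert.bert.bert_encoder.layers.{i}.intermediate.bias'
--         weight_map[f'encoder_layer_{i}_ffn_fc_1.w_0'] = f'bert.bert.bert_encoder.layers.{i}.output.dense.weight'
--         weight_map[f'encoder_layer_{i}_ffn_fc_1.b_0'] = f'bert.bert.bert_encoder.layers.{i}.output.dense.bias'
--         weight_map[
--             f'encoder_layer_{i}_post_ffn_layer_norm_scale'] = \
--             f'bert.bert.bert_encoder.layers.{i}.output.layernorm.gamma'
--         weight_map[
--             f'encoder_layer_{i}_post_ffn_layer_norm_bias'] = \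
--             f'bert.bert.bert_encoder.layers.{i}.output.layernorm.beta'
--     # add pooler
--     weight_map.update(
--         {
--             'pooled_fc.w_0': 'bert.bert.dense.weight',
--             'pooled_fc.b_0': 'bert.bert.dense.bias',
--             'mask_lm_trans_fc.w_0': 'bert.cls1.dense.weight',
--             'mask_lm_trans_fc.b_0': 'bert.cls1.dense.bias',
--             'mask_lm_trans_layer_norm_scale': 'bert.cls1.layernorm.gamma',
--             'mask_lm_trans_layer_norm_bias': 'bert.cls1.layernorm.beta',
--             'mask_lm_out_fc.b_0': 'bert.cls1.output_bias'
--         }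
--     )
--     return weight_map
-- ===== SOURCE B (Python) =====
-- import collections
--
-- # Prologue and pooler entries, in A's order.
-- _PROLOGUE = [
--     ('word_embedding', "bert.bert.bert_embedding_lookup.embedding_table"),
--     ('pos_embedding', "bert.bert.bert_embedding_postprocessor.full_position_embeddings"),
--     ('sent_embedding', "bert.bert.bert_embedding_postprocessor.embedding_table"),
--     ('pre_encoder_layer_norm_scale', 'bert.bert.bert_embedding_postprocessor.layernorm.gamma'),
--     ('pre_encoder_layer_norm_bias', 'bert.bert.bert_embedding_postprocessor.layernorm.beta'),
-- ]
--
-- _POOLER = [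
--     ('pooled_fc.w_0', 'bert.bert.dense.weight'),
--     ('pooled_fc.b_0', 'bert.bert.dense.bias'),
--     ('mask_lm_trans_fc.w_0', 'bert.cls1.dense.weight'),
--     ('mask_lm_trans_fc.b_0', 'bert.cls1.dense.bias'),
--     ('mask_lm_trans_layer_norm_scale', 'bert.cls1.layernorm.gamma'),
--     ('mask_lm_trans_layer_norm_bias', 'bert.cls1.layernorm.beta'),
--     ('mask_lm_out_fc.b_0', 'bert.cls1.output_bias'),
-- ]
--
-- # Per layer the names come in two groups: some fully-connected sublayers (each
-- # contributing a w_0/weight and a b_0/bias entry) followed by that group's layer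
-- # norm (contributing a _scale/gamma and a _bias/beta entry).
-- _GROUPS = [
--     ([('multi_head_att_query_fc', 'attention.attention.query_layer'),
--       ('multi_head_att_key_fc', 'attention.attention.key_layer'),
--       ('multi_head_att_value_fc', 'attention.attention.value_layer'),
--       ('multi_head_att_output_fc', 'attention.output.dense')],
--      ('post_att_layer_norm', 'attention.output.layernorm')),
--     ([('ffn_fc_0', 'intermediate'),
--       ('ffn_fc_1', 'output.dense')],
--      ('post_ffn_layer_norm', 'output.layernorm')),
-- ]
--
--
-- def _layer_pairs(i):
--     """All (paddle, bert) name pairs of attention layer i, derived from the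
--     fc-name/layer-norm structure instead of being listed one by one."""
--     pp = f'encoder_layer_{i}_'
--     bp = f'bert.bert.bert_encoder.layers.{i}.'
--     pairs = []
--     for fcs, (norm_p, norm_b) in _GROUPS:
--         for fc_p, fc_b in fcs:
--             pairs.append((pp + fc_p + '.w_0', bp + fc_b + '.weight'))
--             pairs.append((pp + fc_p + '.b_0', bp + fc_b + '.bias'))
--         pairs.append((pp + norm_p + '_scale', bp + norm_b + '.gamma'))
--         pairs.append((pp + norm_p + '_bias', bp + norm_b + '.beta'))
--     return pairs
--
--
-- def _entries(attention_num):
--     """Lazily yield all (paddle, bert) pairs in A's insertion order."""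
--     yield from _PROLOGUE
--     for i in range(attention_num):
--         yield from _layer_pairs(i)
--     yield from _POOLER
--
--
-- def build_params_map(attention_num=24):
--     """
--     build params map from paddle-paddle's ERNIE to transformer's BERT
--     :return:
--     """
--     return collections.OrderedDict(_entries(attention_num))
-- ===== Notes on version B (the rewrite author's own statement) =====
-- stated objective: alternative
-- what changed: Instead of mutating an OrderedDict with a long block of explicit per-layer assignments, B derives each layer's pairs from the fc/layer-norm naming structure (w_0/weight, b_0/bias, _scale/gamma, _bias/beta), streams all entries in order and constructs the OrderedDict once at the end.
import Mathlib
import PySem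

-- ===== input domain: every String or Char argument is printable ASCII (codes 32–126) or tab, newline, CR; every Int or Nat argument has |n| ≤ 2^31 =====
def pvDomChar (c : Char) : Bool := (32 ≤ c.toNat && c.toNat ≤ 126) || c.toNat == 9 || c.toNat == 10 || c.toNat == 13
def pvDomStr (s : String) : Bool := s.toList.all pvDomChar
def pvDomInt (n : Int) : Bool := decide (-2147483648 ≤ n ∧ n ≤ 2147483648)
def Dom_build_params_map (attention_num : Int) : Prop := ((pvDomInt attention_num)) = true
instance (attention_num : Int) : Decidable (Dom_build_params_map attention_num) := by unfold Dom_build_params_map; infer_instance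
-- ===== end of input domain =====

-- B derives each layer's name pairs from the fc/layer-norm naming structure, accumulates all
-- entries as a flat list and builds the dict once at the end (alternative decomposition, same cost).

-- ===== PORT A =====
def build_params_map (attention_num : Int) : List (String × String) :=
  let weight_map : PySem.Dict String String := PySem.Dict.ofList
    [("word_embedding", "bert.bert.bert_embedding_lookup.embedding_table"),
     ("pos_embedding", "bert.bert.bert_embedding_postprocessor.full_position_embeddings"),
     ("sent_embedding", "bert.bert.bert_embedding_postprocessor.embedding_table"),
     ("pre_encoder_layer_norm_scale", "bert.bert.bert_embedding_postprocessor.layernorm.gamma"),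
     ("pre_encoder_layer_norm_bias", "bert.bert.bert_embedding_postprocessor.layernorm.beta")]
  -- add attention layers
  let weight_map := (PySem.List.pyRange 0 attention_num 1).foldl (fun wm i =>
    ((((((((((((((((wm.insert
      ("encoder_layer_" ++ PySem.Int.toStr i ++ "_multi_head_att_query_fc.w_0")
      ("bert.bert.bert_encoder.layers." ++ PySem.Int.toStr i ++ ".attention.attention.query_layer.weight")).insert
      ("encoder_layer_" ++ PySem.Int.toStr i ++ "_multi_head_att_query_fc.b_0")
      ("bert.bert.bert_encoder.layers." ++ PySem.Int.toStr i ++ ".attention.attention.query_layer.bias")).insert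
      ("encoder_layer_" ++ PySem.Int.toStr i ++ "_multi_head_att_key_fc.w_0")
      ("bert.bert.bert_encoder.layers." ++ PySem.Int.toStr i ++ ".attention.attention.key_layer.weight")).insert
      ("encoder_layer_" ++ PySem.Int.toStr i ++ "_multi_head_att_key_fc.b_0")
      ("bert.bert.bert_encoder.layers." ++ PySem.Int.toStr i ++ ".attention.attention.key_layer.bias")).insert
      ("encoder_layer_" ++ PySem.Int.toStr i ++ "_multi_head_att_value_fc.w_0")
      ("bert.bert.bert_encoder.layers." ++ PySem.Int.toStr i ++ ".attention.attention.value_layer.weight")).insert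
      ("encoder_layer_" ++ PySem.Int.toStr i ++ "_multi_head_att_value_fc.b_0")
      ("bert.bert.bert_encoder.layers." ++ PySem.Int.toStr i ++ ".attention.attention.value_layer.bias")).insert
      ("encoder_layer_" ++ PySem.Int.toStr i ++ "_multi_head_att_output_fc.w_0")
      ("bert.bert.bert_encoder.layers." ++ PySem.Int.toStr i ++ ".attention.output.dense.weight")).insert
      ("encoder_layer_" ++ PySem.Int.toStr i ++ "_multi_head_att_output_fc.b_0")
      ("bert.bert.bert_encoder.layers." ++ PySem.Int.toStr i ++ ".attention.output.dense.bias")).insert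
      ("encoder_layer_" ++ PySem.Int.toStr i ++ "_post_att_layer_norm_scale")
      ("bert.bert.bert_encoder.layers." ++ PySem.Int.toStr i ++ ".attention.output.layernorm.gamma")).insert
      ("encoder_layer_" ++ PySem.Int.toStr i ++ "_post_att_layer_norm_bias")
      ("bert.bert.bert_encoder.layers." ++ PySem.Int.toStr i ++ ".attention.output.layernorm.beta")).insert
      ("encoder_layer_" ++ PySem.Int.toStr i ++ "_ffn_fc_0.w_0")
      ("bert.bert.bert_encoder.layers." ++ PySem.Int.toStr i ++ ".intermediate.weight")).insert
      ("encoder_layer_" ++ PySem.Int.toStr i ++ "_ffn_fc_0.b_0")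
      ("bert.bert.bert_encoder.layers." ++ PySem.Int.toStr i ++ ".intermediate.bias")).insert
      ("encoder_layer_" ++ PySem.Int.toStr i ++ "_ffn_fc_1.w_0")
      ("bert.bert.bert_encoder.layers." ++ PySem.Int.toStr i ++ ".output.dense.weight")).insert
      ("encoder_layer_" ++ PySem.Int.toStr i ++ "_ffn_fc_1.b_0")
      ("bert.bert.bert_encoder.layers." ++ PySem.Int.toStr i ++ ".output.dense.bias")).insert
      ("encoder_layer_" ++ PySem.Int.toStr i ++ "_post_ffn_layer_norm_scale")
      ("bert.bert.bert_encoder.layers." ++ PySem.Int.toStr i ++ ".output.layernorm.gamma")).insert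
      ("encoder_layer_" ++ PySem.Int.toStr i ++ "_post_ffn_layer_norm_bias")
      ("bert.bert.bert_encoder.layers." ++ PySem.Int.toStr i ++ ".output.layernorm.beta"))) weight_map
  -- add pooler
  let weight_map := weight_map.update
    [("pooled_fc.w_0", "bert.bert.dense.weight"),
     ("pooled_fc.b_0", "bert.bert.dense.bias"),
     ("mask_lm_trans_fc.w_0", "bert.cls1.dense.weight"),
     ("mask_lm_trans_fc.b_0", "bert.cls1.dense.bias"),
     ("mask_lm_trans_layer_norm_scale", "bert.cls1.layernorm.gamma"),
     ("mask_lm_trans_layer_norm_bias", "bert.cls1.layernorm.beta"),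
     ("mask_lm_out_fc.b_0", "bert.cls1.output_bias")]
  weight_map.items

-- ===== PORT B =====
def pvPrologue : List (String × String) :=
  [("word_embedding", "bert.bert.bert_embedding_lookup.embedding_table"),
   ("pos_embedding", "bert.bert.bert_embedding_postprocessor.full_position_embeddings"),
   ("sent_embedding", "bert.bert.bert_embedding_postprocessor.embedding_table"),
   ("pre_encoder_layer_norm_scale", "bert.bert.bert_embedding_postprocessor.layernorm.gamma"),
   ("pre_encoder_layer_norm_bias", "bert.bert.bert_embedding_postprocessor.layernorm.beta")]

def pvPooler : List (String × String) :=
  [("pooled_fc.w_0", "bert.bert.dense.weight"),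
   ("pooled_fc.b_0", "bert.bert.dense.bias"),
   ("mask_lm_trans_fc.w_0", "bert.cls1.dense.weight"),
   ("mask_lm_trans_fc.b_0", "bert.cls1.dense.bias"),
   ("mask_lm_trans_layer_norm_scale", "bert.cls1.layernorm.gamma"),
   ("mask_lm_trans_layer_norm_bias", "bert.cls1.layernorm.beta"),
   ("mask_lm_out_fc.b_0", "bert.cls1.output_bias")]

-- per layer: groups of fully-connected sublayers, each followed by its layer norm
def pvGroups : List (List (String × String) × (String × String)) :=
  [([("multi_head_att_query_fc", "attention.attention.query_layer"),
     ("multi_head_att_key_fc", "attention.attention.key_layer"),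
     ("multi_head_att_value_fc", "attention.attention.value_layer"),
     ("multi_head_att_output_fc", "attention.output.dense")],
    ("post_att_layer_norm", "attention.output.layernorm")),
   ([("ffn_fc_0", "intermediate"),
     ("ffn_fc_1", "output.dense")],
    ("post_ffn_layer_norm", "output.layernorm"))]

def pvLayerPairs (i : Int) : List (String × String) :=
  let pp := "encoder_layer_" ++ PySem.Int.toStr i ++ "_"
  let bp := "bert.bert.bert_encoder.layers." ++ PySem.Int.toStr i ++ "."
  pvGroups.foldl (fun pairs g =>
    (g.1.foldl (fun pairs fc =>
        (pairs ++ [(pp ++ fc.1 ++ ".w_0", bp ++ fc.2 ++ ".weight")])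
          ++ [(pp ++ fc.1 ++ ".b_0", bp ++ fc.2 ++ ".bias")]) pairs
      ++ [(pp ++ g.2.1 ++ "_scale", bp ++ g.2.2 ++ ".gamma")])
      ++ [(pp ++ g.2.1 ++ "_bias", bp ++ g.2.2 ++ ".beta")]) []

def build_params_map_alt (attention_num : Int) : List (String × String) :=
  let entries := pvPrologue
  let entries := (PySem.List.pyRange 0 attention_num 1).foldl
    (fun es i => es ++ pvLayerPairs i) entries
  let entries := entries ++ pvPooler
  (PySem.Dict.ofList entries).items

-- ===== PRECONDITION & SPEC =====
def Spec_build_params_map (attention_num : Int) (out : List (String × String)) : Prop := out = build_params_map_alt attention_num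
instance (attention_num : Int) (out : List (String × String)) : Decidable (Spec_build_params_map attention_num out) := by unfold Spec_build_params_map; infer_instance

-- ===== CLAIM (what is proved, stated in full; the proofs are below) =====
def Claim_equal_build_params_map : Prop := ∀ (attention_num : Int), Dom_build_params_map attention_num → Spec_build_params_map attention_num (build_params_map attention_num)

-- ===== LEMMAS AND PROOFS =====

-- the 16 per-layer (paddle suffix, bert suffix) pairs, in A's insertion order
def pvTemplates : List (String × String) :=
  [("multi_head_att_query_fc.w_0", "attention.attention.query_layer.weight"),
   ("multi_head_att_query_fc.b_0", "attention.attention.query_layer.bias"),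
   ("multi_head_att_key_fc.w_0", "attention.attention.key_layer.weight"),
   ("multi_head_att_key_fc.b_0", "attention.attention.key_layer.bias"),
   ("multi_head_att_value_fc.w_0", "attention.attention.value_layer.weight"),
   ("multi_head_att_value_fc.b_0", "attention.attention.value_layer.bias"),
   ("multi_head_att_output_fc.w_0", "attention.output.dense.weight"),
   ("multi_head_att_output_fc.b_0", "attention.output.dense.bias"),
   ("post_att_layer_norm_scale", "attention.output.layernorm.gamma"),
   ("post_att_layer_norm_bias", "attention.output.layernorm.beta"),
   ("ffn_fc_0.w_0", "intermediate.weight"),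
   ("ffn_fc_0.b_0", "intermediate.bias"),
   ("ffn_fc_1.w_0", "output.dense.weight"),
   ("ffn_fc_1.b_0", "output.dense.bias"),
   ("post_ffn_layer_norm_scale", "output.layernorm.gamma"),
   ("post_ffn_layer_norm_bias", "output.layernorm.beta")]

def pvK (a : Int × (String × String)) : String :=
  "encoder_layer_" ++ PySem.Int.toStr a.1 ++ "_" ++ a.2.1

def pvV (a : Int × (String × String)) : String :=
  "bert.bert.bert_encoder.layers." ++ PySem.Int.toStr a.1 ++ "." ++ a.2.2

def pvL (n : Int) : List (Int × (String × String)) :=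
  (PySem.List.pyRange 0 n 1).flatMap (fun i => pvTemplates.map (Prod.mk i))

-- ---- decimal representation of Nat.toDigits ----
def pvRep (n : ℕ) : List Char :=
  if n = 0 then ['0'] else ((Nat.digits 10 n).map Nat.digitChar).reverse

theorem pv_toDigitsCore_eq (n : ℕ) : ∀ (fuel : ℕ), n < fuel → ∀ (acc : List Char),
    Nat.toDigitsCore 10 fuel n acc = pvRep n ++ acc := by
  induction n using Nat.strong_induction_on with
  | _ n ih =>
    intro fuel hf acc
    match fuel with
    | 0 => omega
    | fuel + 1 =>
      rw [Nat.toDigitsCore]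
      by_cases h0 : n / 10 = 0
      · simp only [h0]
        by_cases hn : n = 0
        · subst hn; rfl
        · unfold pvRep
          rw [if_neg hn, Nat.digits_def' (by norm_num : (1:ℕ) < 10) (Nat.pos_of_ne_zero hn), h0]
          simp
      · rw [if_neg h0]
        have hn : n ≠ 0 := by omega
        have hdiv_lt : n / 10 < n := Nat.div_lt_self (by omega) (by norm_num)
        rw [ih (n / 10) hdiv_lt fuel (by omega) _]
        unfold pvRep
        rw [if_neg hn, if_neg h0,
          Nat.digits_def' (by norm_num : (1:ℕ) < 10) (Nat.pos_of_ne_zero hn)]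
        simp

theorem pv_toDigits_eq (n : ℕ) : Nat.toDigits 10 n = pvRep n := by
  have := pv_toDigitsCore_eq n (n + 1) (Nat.lt_succ_self n) []
  simpa [Nat.toDigits] using this

theorem pv_digitChar_toNat (d : ℕ) (h : d < 10) : (Nat.digitChar d).toNat = d + 48 := by
  interval_cases d <;> rfl

theorem pv_mem_pvRep (n : ℕ) (c : Char) (hc : c ∈ pvRep n) :
    48 ≤ c.toNat ∧ c.toNat ≤ 57 := by
  unfold pvRep at hc
  split at hc
  · simp at hc; subst hc; decide
  · rw [List.mem_reverse, List.mem_map] at hc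
    obtain ⟨d, hd, rfl⟩ := hc
    have hlt : d < 10 := Nat.digits_lt_base (by norm_num) hd
    rw [pv_digitChar_toNat d hlt]; omega

theorem pv_map_digitChar_inj {l1 l2 : List ℕ} (h1 : ∀ d ∈ l1, d < 10) (h2 : ∀ d ∈ l2, d < 10)
    (h : l1.map Nat.digitChar = l2.map Nat.digitChar) : l1 = l2 := by
  induction l1 generalizing l2 with
  | nil => cases l2 <;> simp_all
  | cons d l1' ih =>
    cases l2 with
    | nil => simp_all
    | cons e l2' =>
      simp only [List.map_cons, List.cons.injEq] at h
      have hd := pv_digitChar_toNat d (h1 d List.mem_cons_self)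
      have he := pv_digitChar_toNat e (h2 e List.mem_cons_self)
      have : d = e := by
        have := congrArg Char.toNat h.1
        omega
      subst this
      exact congrArg _ (ih (fun x hx => h1 x (List.mem_cons_of_mem _ hx))
        (fun x hx => h2 x (List.mem_cons_of_mem _ hx)) h.2)

theorem pvRep_inj {m n : ℕ} (h : pvRep m = pvRep n) : m = n := by
  unfold pvRep at h
  split_ifs at h with hm hn hn
  · omega
  · exfalso
    have hmap : (Nat.digits 10 n).map Nat.digitChar = ['0'] := by
      have := congrArg List.reverse h.symm; simpa using this
    simp only [List.map_eq_cons_iff, List.map_eq_nil_iff] at hmap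
    obtain ⟨a, as, hna, hda, has⟩ := hmap
    have ha : a < 10 := Nat.digits_lt_base (by norm_num) (hna ▸ List.mem_cons_self)
    have ha0 : a = 0 := by
      have := congrArg Char.toNat hda
      rw [pv_digitChar_toNat a ha] at this
      simpa using this
    have := Nat.getLast_digit_ne_zero 10 hn
    simp [hna, has, ha0] at this
  · exfalso
    have hmap : (Nat.digits 10 m).map Nat.digitChar = ['0'] := by
      have := congrArg List.reverse h; simpa using this
    simp only [List.map_eq_cons_iff, List.map_eq_nil_iff] at hmap
    obtain ⟨a, as, hna, hda, has⟩ := hmap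
    have ha : a < 10 := Nat.digits_lt_base (by norm_num) (hna ▸ List.mem_cons_self)
    have ha0 : a = 0 := by
      have := congrArg Char.toNat hda
      rw [pv_digitChar_toNat a ha] at this
      simpa using this
    have := Nat.getLast_digit_ne_zero 10 hm
    simp [hna, has, ha0] at this
  · have hmap := congrArg List.reverse h
    simp only [List.reverse_reverse] at hmap
    have hd := pv_map_digitChar_inj
      (fun d hd => Nat.digits_lt_base (by norm_num) hd)
      (fun d hd => Nat.digits_lt_base (by norm_num) hd) hmap
    have := congrArg (Nat.ofDigits 10) hd
    rwa [Nat.ofDigits_digits, Nat.ofDigits_digits] at this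

-- ---- toChars / toStr ----
theorem pv_underscore_not_mem_toChars (n : Int) : '_' ∉ PySem.Int.toChars n := by
  unfold PySem.Int.toChars
  split <;> intro hmem
  · rcases List.mem_cons.mp hmem with h | h
    · exact absurd h (by decide)
    · rw [pv_toDigits_eq] at h
      have := pv_mem_pvRep _ _ h; revert this; decide
  · rw [pv_toDigits_eq] at hmem
    have := pv_mem_pvRep _ _ hmem; revert this; decide

theorem pv_toChars_inj {m n : Int} (h : PySem.Int.toChars m = PySem.Int.toChars n) : m = n := by
  unfold PySem.Int.toChars at h
  simp only [pv_toDigits_eq] at h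
  split_ifs at h with hm hn hn
  · simp only [List.cons.injEq, true_and] at h
    have := pvRep_inj h
    omega
  · exfalso
    have : '-' ∈ pvRep n.toNat := h ▸ List.mem_cons_self
    have := pv_mem_pvRep _ _ this; revert this; decide
  · exfalso
    have : '-' ∈ pvRep m.toNat := h.symm ▸ List.mem_cons_self
    have := pv_mem_pvRep _ _ this; revert this; decide
  · have := pvRep_inj h
    omega

-- ---- splitting at the first underscore after an underscore-free prefix ----
theorem pv_split_underscore : ∀ (a : List Char) {b : List Char} {s t : List Char},
    '_' ∉ a → '_' ∉ b → a ++ '_' :: s = b ++ '_' :: t → a = b ∧ s = t := by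
  intro a
  induction a with
  | nil =>
    intro b s t _ hb h
    cases b with
    | nil => simpa using h
    | cons c b' =>
      simp at h
      exact absurd (h.1 ▸ List.mem_cons_self) hb
  | cons c a' iha =>
    intro b s t ha hb h
    cases b with
    | nil =>
      simp at h
      exact absurd (h.1 ▸ List.mem_cons_self) ha
    | cons c' b' =>
      simp at h
      obtain ⟨rfl, h2⟩ := h
      have := iha (fun hm => ha (List.mem_cons_of_mem _ hm))
        (fun hm => hb (List.mem_cons_of_mem _ hm)) h2
      exact ⟨by simp [this.1], this.2⟩

-- ---- key facts ----
theorem pvK_toList (a : Int × (String × String)) :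
    (pvK a).toList = "encoder_layer_".toList ++ (PySem.Int.toChars a.1 ++ ('_' :: a.2.1.toList)) := by
  simp [pvK, String.toList_append, PySem.Int.toList_toStr]

theorem pvK_inj {a b : Int × (String × String)} (h : pvK a = pvK b) :
    a.1 = b.1 ∧ a.2.1 = b.2.1 := by
  have hl := congrArg String.toList h
  rw [pvK_toList, pvK_toList] at hl
  have hl2 := List.append_cancel_left hl
  have := pv_split_underscore _ (pv_underscore_not_mem_toChars a.1)
    (pv_underscore_not_mem_toChars b.1) hl2
  exact ⟨pv_toChars_inj this.1, String.toList_inj.mp this.2⟩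

theorem pvK_head (a : Int × (String × String)) : (pvK a).toList.head? = some 'e' := by
  rw [pvK_toList]; rfl

theorem pvK_ne (a : Int × (String × String)) (t : String)
    (h : t.toList.head? ≠ some 'e') : pvK a ≠ t := by
  intro he
  exact h (he ▸ pvK_head a)

theorem pvT_fst_inj : ∀ p ∈ pvTemplates, ∀ q ∈ pvTemplates, p.1 = q.1 → p = q := by decide

theorem pv_nodup_map_K (n : Int) : ((pvL n).map pvK).Nodup := by
  have hL : (pvL n).Nodup := by
    have : pvL n = (PySem.List.pyRange 0 n 1) ×ˢ pvTemplates := rfl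
    rw [this]
    exact (PySem.List.nodup_pyRange_one 0 n).product (by decide)
  apply hL.map_on
  intro x hx y hy hxy
  have h1 := pvK_inj hxy
  have hx2 : x.2 ∈ pvTemplates := by
    unfold pvL at hx
    rw [List.mem_flatMap] at hx
    obtain ⟨i, _, hx⟩ := hx
    rw [List.mem_map] at hx
    obtain ⟨p, hp, rfl⟩ := hx
    exact hp
  have hy2 : y.2 ∈ pvTemplates := by
    unfold pvL at hy
    rw [List.mem_flatMap] at hy
    obtain ⟨i, _, hy⟩ := hy
    rw [List.mem_map] at hy
    obtain ⟨p, hp, rfl⟩ := hy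
    exact hp
  have := pvT_fst_inj x.2 hx2 y.2 hy2 h1.2
  exact Prod.ext h1.1 this

-- ---- the common closed form of both ports ----
def pvStep (d : PySem.Dict String String) (a : Int × (String × String)) : PySem.Dict String String :=
  d.insert (pvK a) (pvV a)

theorem pv_d0_keys :
    (PySem.Dict.ofList
      [("word_embedding", "bert.bert.bert_embedding_lookup.embedding_table"),
       ("pos_embedding", "bert.bert.bert_embedding_postprocessor.full_position_embeddings"),
       ("sent_embedding", "bert.bert.bert_embedding_postprocessor.embedding_table"),
       ("pre_encoder_layer_norm_scale", "bert.bert.bert_embedding_postprocessor.layernorm.gamma"),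
       ("pre_encoder_layer_norm_bias", "bert.bert.bert_embedding_postprocessor.layernorm.beta")]
      : PySem.Dict String String).keys
    = ["word_embedding", "pos_embedding", "sent_embedding",
       "pre_encoder_layer_norm_scale", "pre_encoder_layer_norm_bias"] := by decide

theorem pv_fresh_d0 (n : Int) : ∀ a ∈ pvL n,
    (PySem.Dict.ofList
      [("word_embedding", "bert.bert.bert_embedding_lookup.embedding_table"),
       ("pos_embedding", "bert.bert.bert_embedding_postprocessor.full_position_embeddings"),
       ("sent_embedding", "bert.bert.bert_embedding_postprocessor.embedding_table"),
       ("pre_encoder_layer_norm_scale", "bert.bert.bert_embedding_postprocessor.layernorm.gamma"),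
       ("pre_encoder_layer_norm_bias", "bert.bert.bert_embedding_postprocessor.layernorm.beta")]
      : PySem.Dict String String).contains (pvK a) = false := by
  intro a _
  rw [PySem.Dict.contains_eq_decide_mem_keys, pv_d0_keys, decide_eq_false_iff_not]
  simp only [List.mem_cons, List.not_mem_nil, or_false]
  push Not
  exact ⟨pvK_ne a _ (by decide), pvK_ne a _ (by decide), pvK_ne a _ (by decide),
    pvK_ne a _ (by decide), pvK_ne a _ (by decide)⟩

theorem pv_body_eq (wm : PySem.Dict String String) (i : Int) :
    ((((((((((((((((wm.insert
      ("encoder_layer_" ++ PySem.Int.toStr i ++ "_multi_head_att_query_fc.w_0")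
      ("bert.bert.bert_encoder.layers." ++ PySem.Int.toStr i ++ ".attention.attention.query_layer.weight")).insert
      ("encoder_layer_" ++ PySem.Int.toStr i ++ "_multi_head_att_query_fc.b_0")
      ("bert.bert.bert_encoder.layers." ++ PySem.Int.toStr i ++ ".attention.attention.query_layer.bias")).insert
      ("encoder_layer_" ++ PySem.Int.toStr i ++ "_multi_head_att_key_fc.w_0")
      ("bert.bert.bert_encoder.layers." ++ PySem.Int.toStr i ++ ".attention.attention.key_layer.weight")).insert
      ("encoder_layer_" ++ PySem.Int.toStr i ++ "_multi_head_att_key_fc.b_0")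
      ("bert.bert.bert_encoder.layers." ++ PySem.Int.toStr i ++ ".attention.attention.key_layer.bias")).insert
      ("encoder_layer_" ++ PySem.Int.toStr i ++ "_multi_head_att_value_fc.w_0")
      ("bert.bert.bert_encoder.layers." ++ PySem.Int.toStr i ++ ".attention.attention.value_layer.weight")).insert
      ("encoder_layer_" ++ PySem.Int.toStr i ++ "_multi_head_att_value_fc.b_0")
      ("bert.bert.bert_encoder.layers." ++ PySem.Int.toStr i ++ ".attention.attention.value_layer.bias")).insert
      ("encoder_layer_" ++ PySem.Int.toStr i ++ "_multi_head_att_output_fc.w_0")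
      ("bert.bert.bert_encoder.layers." ++ PySem.Int.toStr i ++ ".attention.output.dense.weight")).insert
      ("encoder_layer_" ++ PySem.Int.toStr i ++ "_multi_head_att_output_fc.b_0")
      ("bert.bert.bert_encoder.layers." ++ PySem.Int.toStr i ++ ".attention.output.dense.bias")).insert
      ("encoder_layer_" ++ PySem.Int.toStr i ++ "_post_att_layer_norm_scale")
      ("bert.bert.bert_encoder.layers." ++ PySem.Int.toStr i ++ ".attention.output.layernorm.gamma")).insert
      ("encoder_layer_" ++ PySem.Int.toStr i ++ "_post_att_layer_norm_bias")
      ("bert.bert.bert_encoder.layers." ++ PySem.Int.toStr i ++ ".attention.output.layernorm.beta")).insert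
      ("encoder_layer_" ++ PySem.Int.toStr i ++ "_ffn_fc_0.w_0")
      ("bert.bert.bert_encoder.layers." ++ PySem.Int.toStr i ++ ".intermediate.weight")).insert
      ("encoder_layer_" ++ PySem.Int.toStr i ++ "_ffn_fc_0.b_0")
      ("bert.bert.bert_encoder.layers." ++ PySem.Int.toStr i ++ ".intermediate.bias")).insert
      ("encoder_layer_" ++ PySem.Int.toStr i ++ "_ffn_fc_1.w_0")
      ("bert.bert.bert_encoder.layers." ++ PySem.Int.toStr i ++ ".output.dense.weight")).insert
      ("encoder_layer_" ++ PySem.Int.toStr i ++ "_ffn_fc_1.b_0")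
      ("bert.bert.bert_encoder.layers." ++ PySem.Int.toStr i ++ ".output.dense.bias")).insert
      ("encoder_layer_" ++ PySem.Int.toStr i ++ "_post_ffn_layer_norm_scale")
      ("bert.bert.bert_encoder.layers." ++ PySem.Int.toStr i ++ ".output.layernorm.gamma")).insert
      ("encoder_layer_" ++ PySem.Int.toStr i ++ "_post_ffn_layer_norm_bias")
      ("bert.bert.bert_encoder.layers." ++ PySem.Int.toStr i ++ ".output.layernorm.beta"))
    = (pvTemplates.map (Prod.mk i)).foldl pvStep wm := by
  simp [pvTemplates, pvStep, pvK, pvV, String.append_assoc]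

theorem pv_fresh_pooler (n : Int) (d : PySem.Dict String String)
    (hd : d.items = pvPrologue ++ (pvL n).map (fun a => (pvK a, pvV a))) :
    ∀ p ∈ pvPooler, d.contains p.1 = false := by
  intro p hp
  rw [PySem.Dict.contains_eq_decide_mem_keys, decide_eq_false_iff_not]
  have hkeys : d.keys = d.items.map Prod.fst := rfl
  rw [hkeys, hd]
  simp only [List.map_append, List.map_map, List.mem_append, List.mem_map, not_or]
  fin_cases hp <;>
    exact ⟨by decide, fun ⟨a, _, hKa⟩ => pvK_ne a _ (by decide) hKa⟩

theorem pv_foldfold (d : PySem.Dict String String) (n : Int) :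
    List.foldl (fun wm i => List.foldl pvStep wm (List.map (Prod.mk i) pvTemplates)) d
      (PySem.List.pyRange 0 n 1)
    = List.foldl pvStep d (pvL n) := by
  unfold pvL
  rw [List.foldl_flatMap]

theorem pvA_eq (n : Int) :
    build_params_map n = pvPrologue ++ (pvL n).map (fun a => (pvK a, pvV a)) ++ pvPooler := by
  have key : ((List.foldl
        (fun (wm : PySem.Dict String String) (i : Int) =>
          List.foldl pvStep wm (List.map (Prod.mk i) pvTemplates))
        (PySem.Dict.ofList
          [("word_embedding", "bert.bert.bert_embedding_lookup.embedding_table"),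
           ("pos_embedding", "bert.bert.bert_embedding_postprocessor.full_position_embeddings"),
           ("sent_embedding", "bert.bert.bert_embedding_postprocessor.embedding_table"),
           ("pre_encoder_layer_norm_scale", "bert.bert.bert_embedding_postprocessor.layernorm.gamma"),
           ("pre_encoder_layer_norm_bias", "bert.bert.bert_embedding_postprocessor.layernorm.beta")])
        (PySem.List.pyRange 0 n 1)).update
          [("pooled_fc.w_0", "bert.bert.dense.weight"),
           ("pooled_fc.b_0", "bert.bert.dense.bias"),
           ("mask_lm_trans_fc.w_0", "bert.cls1.dense.weight"),
           ("mask_lm_trans_fc.b_0", "bert.cls1.dense.bias"),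
           ("mask_lm_trans_layer_norm_scale", "bert.cls1.layernorm.gamma"),
           ("mask_lm_trans_layer_norm_bias", "bert.cls1.layernorm.beta"),
           ("mask_lm_out_fc.b_0", "bert.cls1.output_bias")]).items
      = pvPrologue ++ (pvL n).map (fun a => (pvK a, pvV a)) ++ pvPooler := by
    rw [pv_foldfold]
    have h1 := PySem.Dict.items_foldl_insert_fresh (pvL n) pvK pvV _ (pv_fresh_d0 n) (pv_nodup_map_K n)
    rw [show (PySem.Dict.ofList
        [("word_embedding", "bert.bert.bert_embedding_lookup.embedding_table"),
         ("pos_embedding", "bert.bert.bert_embedding_postprocessor.full_position_embeddings"),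
         ("sent_embedding", "bert.bert.bert_embedding_postprocessor.embedding_table"),
         ("pre_encoder_layer_norm_scale", "bert.bert.bert_embedding_postprocessor.layernorm.gamma"),
         ("pre_encoder_layer_norm_bias", "bert.bert.bert_embedding_postprocessor.layernorm.beta")]
        : PySem.Dict String String).items = pvPrologue from rfl] at h1
    rw [show ([("pooled_fc.w_0", "bert.bert.dense.weight"),
       ("pooled_fc.b_0", "bert.bert.dense.bias"),
       ("mask_lm_trans_fc.w_0", "bert.cls1.dense.weight"),
       ("mask_lm_trans_fc.b_0", "bert.cls1.dense.bias"),
       ("mask_lm_trans_layer_norm_scale", "bert.cls1.layernorm.gamma"),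
       ("mask_lm_trans_layer_norm_bias", "bert.cls1.layernorm.beta"),
       ("mask_lm_out_fc.b_0", "bert.cls1.output_bias")] : List (String × String)) = pvPooler from rfl]
    simp only [PySem.Dict.update]
    have hstep : (fun d a => PySem.Dict.insert d (pvK a) (pvV a)) = pvStep := rfl
    rw [hstep] at h1
    have h2 := PySem.Dict.items_foldl_insert_fresh pvPooler Prod.fst Prod.snd _
      (pv_fresh_pooler n _ h1) (by decide)
    rw [h2, h1]
    simp [List.append_assoc]
  unfold build_params_map
  rw [funext fun wm => funext fun i => pv_body_eq wm i]
  exact key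

theorem pvLayerPairs_eq (i : Int) :
    pvLayerPairs i = pvTemplates.map (fun pb => (pvK (i, pb), pvV (i, pb))) := by
  simp [pvLayerPairs, pvGroups, pvTemplates, pvK, pvV, String.append_assoc]

theorem pv_nodup_entries (n : Int) :
    ((pvPrologue ++ (pvL n).map (fun a => (pvK a, pvV a)) ++ pvPooler).map Prod.fst).Nodup := by
  simp only [List.map_append, List.map_map]
  rw [List.nodup_append, List.nodup_append]
  refine ⟨⟨by decide, ?_, ?_⟩, by decide, ?_⟩
  · have := pv_nodup_map_K n
    simpa [Function.comp] using this
  · intro x hx y hy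
    simp only [List.mem_map, Function.comp_def] at hy
    obtain ⟨a, _, rfl⟩ := hy
    simp only [pvPrologue, List.map_cons, List.map_nil, List.mem_cons,
      List.not_mem_nil, or_false] at hx
    rcases hx with rfl | rfl | rfl | rfl | rfl <;> exact Ne.symm (pvK_ne a _ (by decide))
  · intro x hx y hy
    simp only [pvPooler, List.map_cons, List.map_nil, List.mem_cons,
      List.not_mem_nil, or_false] at hy
    rcases List.mem_append.mp hx with hx | hx
    · simp only [pvPrologue, List.map_cons, List.map_nil, List.mem_cons,
        List.not_mem_nil, or_false] at hx
      rcases hx with rfl | rfl | rfl | rfl | rfl <;>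
        rcases hy with rfl | rfl | rfl | rfl | rfl | rfl | rfl <;> decide
    · simp only [List.mem_map, Function.comp_def] at hx
      obtain ⟨a, _, rfl⟩ := hx
      rcases hy with rfl | rfl | rfl | rfl | rfl | rfl | rfl <;>
        exact pvK_ne a _ (by decide)

theorem pvB_eq (n : Int) :
    build_params_map_alt n = pvPrologue ++ (pvL n).map (fun a => (pvK a, pvV a)) ++ pvPooler := by
  have key : (PySem.Dict.ofList
        ((List.foldl (fun es i => es ++ pvLayerPairs i) pvPrologue (PySem.List.pyRange 0 n 1))
          ++ pvPooler)).items
      = pvPrologue ++ (pvL n).map (fun a => (pvK a, pvV a)) ++ pvPooler := by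
    simp only [pvLayerPairs_eq]
    rw [PySem.List.foldl_append_eq_flatMap]
    rw [show List.flatMap (fun i => pvTemplates.map (fun pb => (pvK (i, pb), pvV (i, pb))))
          (PySem.List.pyRange 0 n 1) = (pvL n).map (fun a => (pvK a, pvV a)) from by
      unfold pvL
      rw [List.map_flatMap]
      rfl]
    simp only [PySem.Dict.ofList, PySem.Dict.update]
    have h := PySem.Dict.items_foldl_insert_fresh
      (pvPrologue ++ (pvL n).map (fun a => (pvK a, pvV a)) ++ pvPooler) Prod.fst Prod.snd
      PySem.Dict.empty (by intro a _; simp [PySem.Dict.contains_empty]) (pv_nodup_entries n)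
    rw [h]
    simp [PySem.Dict.empty]
  unfold build_params_map_alt
  exact key

-- ===== VERDICT (by name: the statement is the Claim_ definition above) =====
theorem build_params_map_spec : Claim_equal_build_params_map := by
  intro n _
  unfold Spec_build_params_map
  rw [pvA_eq, pvB_eq]
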